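-- pv_equiv track=rewrite | github.com/deltahenry/cas_ws | src/vision_module/vision_module/detection_node.py | remove_duplicate_detections
-- ===== SOURCE A (Python) =====
-- def remove_duplicate_detections(results, threshold=15):
--     filtered = []
--     for r in results:
--         if 'u' not in r or 'v' not in r:
--             continue
--         is_duplicate = any(
--             abs(r['u'] - f['u']) < threshold and abs(r['v'] - f['v']) < threshold
--             for f in filtered
--         )
--         if not is_duplicate:
--             filtered.append(r)
--     return filtered
-- ===== SOURCE B (Python) =====
-- def remove_duplicate_detections(results, threshold=15):
--     # Spatial hash grid: cell size = threshold, so a duplicate can only lie in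
--     # one of the 3x3 neighbouring cells of a new point's cell.
--     filtered = []
--     if threshold <= 0:
--         # abs(...) < threshold is impossible, so nothing is ever a duplicate
--         for r in results:
--             if 'u' in r and 'v' in r:
--                 filtered.append(r)
--         return filtered
--     grid = {}
--     for r in results:
--         if 'u' not in r or 'v' not in r:
--             continue
--         u, v = r['u'], r['v']
--         cu, cv = u // threshold, v // threshold
--         dup = False
--         for dx in (-1, 0, 1):
--             for dy in (-1, 0, 1):
--                 for (pu, pv) in grid.get((cu + dx, cv + dy), ()):
--                     if abs(u - pu) < threshold and abs(v - pv) < threshold: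
--                         dup = True
--                         break
--                 if dup:
--                     break
--             if dup:
--                 break
--         if not dup:
--             filtered.append(r)
--             grid.setdefault((cu, cv), []).append((u, v))
--     return filtered
-- ===== Notes on version B (the rewrite author's own statement) =====
-- stated objective: alternative
-- what changed: Replaces the quadratic scan of all previously kept detections with a spatial hash grid (cell size = threshold) so each new point is only compared against points stored in its 3x3 neighbouring cells.
import Mathlib
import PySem

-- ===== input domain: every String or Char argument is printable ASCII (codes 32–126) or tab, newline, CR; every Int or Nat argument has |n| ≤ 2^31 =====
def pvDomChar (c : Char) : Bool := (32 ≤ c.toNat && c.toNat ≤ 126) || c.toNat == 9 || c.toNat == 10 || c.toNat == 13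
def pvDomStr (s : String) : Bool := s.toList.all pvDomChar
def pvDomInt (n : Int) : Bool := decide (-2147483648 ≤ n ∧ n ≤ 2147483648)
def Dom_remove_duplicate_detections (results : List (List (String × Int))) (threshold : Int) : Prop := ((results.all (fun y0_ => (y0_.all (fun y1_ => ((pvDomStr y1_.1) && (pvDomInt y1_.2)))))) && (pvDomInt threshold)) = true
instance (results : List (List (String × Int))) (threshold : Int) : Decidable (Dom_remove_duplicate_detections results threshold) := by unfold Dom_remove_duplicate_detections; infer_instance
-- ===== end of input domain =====

-- B replaces A's scan over all kept detections by a spatial hash grid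
-- (cell size = threshold, candidates looked up in the 3x3 neighbouring cells); alternative algorithm.

-- ===== PORT A =====
-- loop body of A's 'for r in results' (filtered is the accumulator)
def pvStepA (threshold : Int) (filtered : List (List (String × Int))) (r : List (String × Int)) : List (List (String × Int)) :=
  match (PySem.Dict.mk r).get? "u", (PySem.Dict.mk r).get? "v" with
  | some u, some v =>
    let is_duplicate := filtered.any (fun f =>
      match (PySem.Dict.mk f).get? "u", (PySem.Dict.mk f).get? "v" with
      | some fu, some fv => decide (|u - fu| < threshold) && decide (|v - fv| < threshold)
      | _, _ => false)
    if is_duplicate then filtered else filtered ++ [r]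
  | _, _ => filtered

def remove_duplicate_detections (results : List (List (String × Int))) (threshold : Int) : List (List (String × Int)) :=
  results.foldl (pvStepA threshold) []

-- ===== PORT B =====
-- loop body of B's threshold <= 0 fast path (no point can ever be a duplicate)
def pvStepB0 (filtered : List (List (String × Int))) (r : List (String × Int)) : List (List (String × Int)) :=
  match (PySem.Dict.mk r).get? "u", (PySem.Dict.mk r).get? "v" with
  | some _, some _ => filtered ++ [r]
  | _, _ => filtered

-- loop body of B's grid loop; state = (filtered, grid : cell -> points stored there)
def pvStepB (threshold : Int)
    (st : List (List (String × Int)) × PySem.Dict (Int × Int) (List (Int × Int)))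
    (r : List (String × Int)) :
    List (List (String × Int)) × PySem.Dict (Int × Int) (List (Int × Int)) :=
  match (PySem.Dict.mk r).get? "u", (PySem.Dict.mk r).get? "v" with
  | some u, some v =>
    let cu := PySem.Int.floordiv u threshold
    let cv := PySem.Int.floordiv v threshold
    let dup := [(-1 : Int), 0, 1].any (fun dx => [(-1 : Int), 0, 1].any (fun dy =>
      (st.2.getD (cu + dx, cv + dy) []).any (fun p =>
        decide (|u - p.1| < threshold) && decide (|v - p.2| < threshold))))
    if dup then st
    else (st.1 ++ [r], st.2.insert (cu, cv) (st.2.getD (cu, cv) [] ++ [(u, v)]))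
  | _, _ => st

def remove_duplicate_detections_alt (results : List (List (String × Int))) (threshold : Int) : List (List (String × Int)) :=
  if threshold ≤ 0 then
    results.foldl pvStepB0 []
  else
    (results.foldl (pvStepB threshold)
      (([] : List (List (String × Int))), (PySem.Dict.empty : PySem.Dict (Int × Int) (List (Int × Int))))).1

-- ===== PRECONDITION & SPEC =====
def Spec_remove_duplicate_detections (results : List (List (String × Int))) (threshold : Int) (out : List (List (String × Int))) : Prop := out = remove_duplicate_detections_alt results threshold
instance (results : List (List (String × Int))) (threshold : Int) (out : List (List (String × Int))) : Decidable (Spec_remove_duplicate_detections results threshold out) := by unfold Spec_remove_duplicate_detections; infer_instance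

-- ===== CLAIM (what is proved, stated in full; the proofs are below) =====
def Claim_equal_remove_duplicate_detections : Prop := ∀ (results : List (List (String × Int))) (threshold : Int), Dom_remove_duplicate_detections results threshold → Spec_remove_duplicate_detections results threshold (remove_duplicate_detections results threshold)

-- ===== LEMMAS AND PROOFS =====

-- the (u, v) coordinates of a detection, if present
def pvUV (r : List (String × Int)) : Option (Int × Int) :=
  match (PySem.Dict.mk r).get? "u", (PySem.Dict.mk r).get? "v" with
  | some u, some v => some (u, v)
  | _, _ => none

-- grid invariant: every stored point sits in its own cell, and the points stored at a
-- point's own cell are exactly the coordinates of the kept detections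
def pvInv (t : Int) (filtered : List (List (String × Int)))
    (grid : PySem.Dict (Int × Int) (List (Int × Int))) : Prop :=
  (∀ c p, p ∈ grid.getD c [] → c = (PySem.Int.floordiv p.1 t, PySem.Int.floordiv p.2 t)) ∧
  (∀ p : Int × Int,
    p ∈ grid.getD (PySem.Int.floordiv p.1 t, PySem.Int.floordiv p.2 t) [] ↔
    ∃ f ∈ filtered, pvUV f = some p)

lemma pv_fdiv_close {t u w : Int} (ht : 0 < t) (h : |u - w| < t) :
    PySem.Int.floordiv u t - 1 ≤ PySem.Int.floordiv w t ∧
    PySem.Int.floordiv w t ≤ PySem.Int.floordiv u t + 1 := by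
  simp only [PySem.Int.floordiv_eq_ediv_of_pos ht]
  have habs := abs_lt.mp h
  have e1 : (u + (-1) * t) / t = u / t + (-1) := Int.add_mul_ediv_right u (-1) (ne_of_gt ht)
  have e2 : (u + 1 * t) / t = u / t + 1 := Int.add_mul_ediv_right u 1 (ne_of_gt ht)
  have m1 : (u + (-1) * t) / t ≤ w / t := Int.ediv_le_ediv ht (by linarith)
  have m2 : w / t ≤ (u + 1 * t) / t := Int.ediv_le_ediv ht (by linarith)
  omega

-- the A-side duplicate test, characterised
lemma pv_anyA_iff (t u v : Int) (filtered : List (List (String × Int))) :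
    (filtered.any (fun f =>
      match (PySem.Dict.mk f).get? "u", (PySem.Dict.mk f).get? "v" with
      | some fu, some fv => decide (|u - fu| < t) && decide (|v - fv| < t)
      | _, _ => false)) = true ↔
    ∃ p : Int × Int, (∃ f ∈ filtered, pvUV f = some p) ∧ |u - p.1| < t ∧ |v - p.2| < t := by
  rw [List.any_eq_true]
  constructor
  · rintro ⟨f, hf, hpred⟩
    rcases hu : (PySem.Dict.mk f).get? "u" with _ | fu <;>
      rcases hv : (PySem.Dict.mk f).get? "v" with _ | fv <;> simp [hu, hv] at hpred
    exact ⟨(fu, fv), ⟨f, hf, by simp [pvUV, hu, hv]⟩, hpred.1, hpred.2⟩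
  · rintro ⟨p, ⟨f, hf, hfp⟩, h1, h2⟩
    refine ⟨f, hf, ?_⟩
    rcases hu : (PySem.Dict.mk f).get? "u" with _ | fu <;>
      rcases hv : (PySem.Dict.mk f).get? "v" with _ | fv <;> simp [pvUV, hu, hv] at hfp
    obtain rfl : (fu, fv) = p := hfp
    simp [h1, h2]

-- with the invariant, B's 3x3-cell duplicate test equals A's full scan
lemma pv_dup_eq (t : Int) (ht : 0 < t) (u v : Int)
    (filtered : List (List (String × Int)))
    (grid : PySem.Dict (Int × Int) (List (Int × Int)))
    (hinv : pvInv t filtered grid) :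
    ([(-1 : Int), 0, 1].any (fun dx => [(-1 : Int), 0, 1].any (fun dy =>
      (grid.getD (PySem.Int.floordiv u t + dx, PySem.Int.floordiv v t + dy) []).any (fun p =>
        decide (|u - p.1| < t) && decide (|v - p.2| < t)))))
    = (filtered.any (fun f =>
      match (PySem.Dict.mk f).get? "u", (PySem.Dict.mk f).get? "v" with
      | some fu, some fv => decide (|u - fu| < t) && decide (|v - fv| < t)
      | _, _ => false)) := by
  obtain ⟨hcell, hmem⟩ := hinv
  rw [Bool.eq_iff_iff, pv_anyA_iff]
  simp only [List.any_eq_true, List.mem_cons, List.not_mem_nil, or_false]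
  constructor
  · rintro ⟨dx, _, dy, _, p, hp, hclose⟩
    have hc := hcell _ p hp
    refine ⟨p, (hmem p).mp ?_, by simpa using hclose⟩
    rw [← hc]; exact hp
  · rintro ⟨p, hpf, h1, h2⟩
    have hp := (hmem p).mpr hpf
    obtain ⟨b1u, b1v⟩ := pv_fdiv_close ht h1
    obtain ⟨b2u, b2v⟩ := pv_fdiv_close ht h2
    refine ⟨PySem.Int.floordiv p.1 t - PySem.Int.floordiv u t, by omega,
            PySem.Int.floordiv p.2 t - PySem.Int.floordiv v t, by omega, p, ?_, by simp [h1, h2]⟩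
    have heq : (PySem.Int.floordiv u t + (PySem.Int.floordiv p.1 t - PySem.Int.floordiv u t),
            PySem.Int.floordiv v t + (PySem.Int.floordiv p.2 t - PySem.Int.floordiv v t))
         = (PySem.Int.floordiv p.1 t, PySem.Int.floordiv p.2 t) := by
      simp
    rw [heq]; exact hp

-- the invariant is preserved when a new non-duplicate detection is kept
lemma pv_inv_insert (t : Int) (filtered : List (List (String × Int)))
    (grid : PySem.Dict (Int × Int) (List (Int × Int)))
    (hinv : pvInv t filtered grid)
    (r : List (String × Int)) (u v : Int)
    (hu : (PySem.Dict.mk r).get? "u" = some u) (hv : (PySem.Dict.mk r).get? "v" = some v) :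
    pvInv t (filtered ++ [r])
      (grid.insert (PySem.Int.floordiv u t, PySem.Int.floordiv v t)
        (grid.getD (PySem.Int.floordiv u t, PySem.Int.floordiv v t) [] ++ [(u, v)])) := by
  obtain ⟨hcell, hmem⟩ := hinv
  have hruv : pvUV r = some (u, v) := by simp [pvUV, hu, hv]
  constructor
  · intro c p hp
    rw [PySem.Dict.getD_insert] at hp
    split_ifs at hp with hc
    · subst hc
      rcases List.mem_append.mp hp with h | h
      · exact hcell _ p h
      · simp only [List.mem_singleton] at h; subst h; rfl
    · exact hcell c p hp
  · intro p
    rw [PySem.Dict.getD_insert]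
    split_ifs with hc
    · rw [List.mem_append, List.mem_singleton]
      constructor
      · rintro (h | rfl)
        · obtain ⟨f, hf, hfp⟩ := (hmem p).mp (by rw [hc]; exact h)
          exact ⟨f, List.mem_append_left _ hf, hfp⟩
        · exact ⟨r, List.mem_append_right _ (by simp), hruv⟩
      · rintro ⟨f, hf, hfp⟩
        rcases List.mem_append.mp hf with hf | hf
        · exact Or.inl (by rw [← hc]; exact (hmem p).mpr ⟨f, hf, hfp⟩)
        · simp only [List.mem_singleton] at hf; subst hf
          exact Or.inr (Option.some.inj (hruv.symm.trans hfp)).symm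
    · constructor
      · intro h
        obtain ⟨f, hf, hfp⟩ := (hmem p).mp h
        exact ⟨f, List.mem_append_left _ hf, hfp⟩
      · rintro ⟨f, hf, hfp⟩
        rcases List.mem_append.mp hf with hf | hf
        · exact (hmem p).mpr ⟨f, hf, hfp⟩
        · simp only [List.mem_singleton] at hf; subst hf
          have hpv : p = (u, v) := (Option.some.inj (hruv.symm.trans hfp)).symm
          subst hpv; exact absurd rfl hc

-- main loop correspondence for t > 0
lemma pv_loop_eq (t : Int) (ht : 0 < t) :
    ∀ (rs : List (List (String × Int))) (filtered : List (List (String × Int)))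
      (grid : PySem.Dict (Int × Int) (List (Int × Int))), pvInv t filtered grid →
      (rs.foldl (pvStepB t) (filtered, grid)).1 = rs.foldl (pvStepA t) filtered := by
  intro rs
  induction rs with
  | nil => intro filtered grid _; rfl
  | cons r rs ih =>
    intro filtered grid hinv
    simp only [List.foldl_cons]
    rcases hu : (PySem.Dict.mk r).get? "u" with _ | u <;>
      rcases hv : (PySem.Dict.mk r).get? "v" with _ | v <;>
      simp only [pvStepA, pvStepB, hu, hv] <;> try exact ih filtered grid hinv
    rw [pv_dup_eq t ht u v filtered grid hinv]
    split_ifs with hdup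
    · exact ih filtered grid hinv
    · exact ih _ _ (pv_inv_insert t filtered grid hinv r u v hu hv)

-- for t ≤ 0 the duplicate test is always false, so A just filters on the keys
lemma pv_loop0_eq (t : Int) (ht : t ≤ 0) :
    ∀ (rs : List (List (String × Int))) (filtered : List (List (String × Int))),
      rs.foldl pvStepB0 filtered = rs.foldl (pvStepA t) filtered := by
  intro rs
  induction rs with
  | nil => intro _; rfl
  | cons r rs ih =>
    intro filtered
    simp only [List.foldl_cons]
    rcases hu : (PySem.Dict.mk r).get? "u" with _ | u <;>
      rcases hv : (PySem.Dict.mk r).get? "v" with _ | v <;>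
      simp only [pvStepA, pvStepB0, hu, hv] <;> try exact ih filtered
    have hany : (filtered.any (fun f =>
        match (PySem.Dict.mk f).get? "u", (PySem.Dict.mk f).get? "v" with
        | some fu, some fv => decide (|u - fu| < t) && decide (|v - fv| < t)
        | _, _ => false)) = false := by
      rw [List.any_eq_false]
      intro f _
      rcases hfu : (PySem.Dict.mk f).get? "u" with _ | fu <;>
        rcases hfv : (PySem.Dict.mk f).get? "v" with _ | fv
      · simp
      · simp
      · simp
      · simp only [Bool.and_eq_true, decide_eq_true_eq, not_and]
        intro h1
        exact absurd h1 (not_lt.mpr (ht.trans (abs_nonneg (u - fu))))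
    rw [hany]
    simp only [Bool.false_eq_true, if_false]
    exact ih (filtered ++ [r])

-- ===== VERDICT (by name: the statement is the Claim_ definition above) =====
theorem remove_duplicate_detections_spec : Claim_equal_remove_duplicate_detections := by
  intro results threshold _
  unfold Spec_remove_duplicate_detections remove_duplicate_detections remove_duplicate_detections_alt
  split_ifs with ht
  · exact (pv_loop0_eq threshold ht results []).symm
  · refine (pv_loop_eq threshold (by omega) results [] PySem.Dict.empty ?_).symm
    constructor
    · intro c p hp; simp [PySem.Dict.getD_empty] at hp
    · intro p; simp [PySem.Dict.getD_empty]
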